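-- pv_equiv track=rewrite | github.com/pypi-data/pypi-mirror-366 | packages/hid1kbrute/hid1kbrute-0.1.2.tar.gz/hid1kbrute-0.1.2/hid1kbrute/utils.py | format_bit_pattern
-- ===== SOURCE A (Python) =====
-- def format_bit_pattern(
--     binary_string: str, window_start: int = 0, window_length: int = None
-- ) -> str:
--     """Format binary string for display with optional window highlighting"""
--     if window_length is None:
--         window_length = len(binary_string)
--
--     # Add spaces every 8 bits for readability
--     formatted = ""
--     for i, bit in enumerate(binary_string):
--         if i > 0 and i % 8 == 0:
--             formatted += " "
--         formatted += bit
--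
--     return formatted
-- ===== SOURCE B (Python) =====
-- def format_bit_pattern(
--     binary_string: str, window_start: int = 0, window_length: int = None
-- ) -> str:
--     """Format binary string for display with optional window highlighting"""
--     if window_length is None:
--         window_length = len(binary_string)
--
--     # Join consecutive 8-character chunks with single spaces
--     return " ".join(
--         binary_string[i:i + 8] for i in range(0, len(binary_string), 8)
--     )
-- ===== Notes on version B (the rewrite author's own statement) =====
-- stated objective: idiomatic
-- what changed: B slices the string into consecutive 8-character chunks with range(0, len, 8) and joins them with spaces, instead of A's per-character scan that tests i % 8 on every bit and appends characters one by one.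
import Mathlib
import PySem

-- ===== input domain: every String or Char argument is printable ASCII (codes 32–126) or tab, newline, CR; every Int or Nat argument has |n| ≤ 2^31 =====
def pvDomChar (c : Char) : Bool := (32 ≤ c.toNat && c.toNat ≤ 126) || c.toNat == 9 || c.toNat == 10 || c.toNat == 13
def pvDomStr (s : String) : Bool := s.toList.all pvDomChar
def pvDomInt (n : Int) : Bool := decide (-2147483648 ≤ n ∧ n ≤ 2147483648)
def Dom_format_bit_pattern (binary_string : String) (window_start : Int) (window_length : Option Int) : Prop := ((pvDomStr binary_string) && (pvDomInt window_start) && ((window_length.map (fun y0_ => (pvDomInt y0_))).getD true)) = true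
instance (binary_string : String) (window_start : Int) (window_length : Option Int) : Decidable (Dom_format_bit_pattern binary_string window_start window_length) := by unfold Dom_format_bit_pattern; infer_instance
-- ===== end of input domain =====

-- B groups the string into 8-character slices joined by spaces (idiomatic chunk-join)
-- instead of A's per-character scan with an i % 8 test; same return value everywhere.
-- window_start / window_length are unused by both, as in the Python.

-- ===== PORT A =====
def format_bit_pattern (binary_string : String) (window_start : Int) (window_length : Option Int) : String :=
  let _window_length : Int := window_length.getD (PySem.Str.len binary_string)
  (PySem.List.enumerate binary_string.toList 0).foldl
    (fun formatted p =>
      let formatted := if 0 < p.1 ∧ PySem.Int.mod p.1 8 = 0 then formatted ++ " " else formatted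
      formatted ++ String.singleton p.2) ""

-- ===== PORT B =====
def format_bit_pattern_alt (binary_string : String) (window_start : Int) (window_length : Option Int) : String :=
  let _window_length : Int := window_length.getD (PySem.Str.len binary_string)
  PySem.Str.join " " ((PySem.List.pyRange 0 (PySem.Str.len binary_string) 8).map
    (fun i => PySem.Str.slice binary_string (some i) (some (i + 8))))

-- ===== PRECONDITION & SPEC =====
def Spec_format_bit_pattern (binary_string : String) (window_start : Int) (window_length : Option Int) (out : String) : Prop := out = format_bit_pattern_alt binary_string window_start window_length
instance (binary_string : String) (window_start : Int) (window_length : Option Int) (out : String) : Decidable (Spec_format_bit_pattern binary_string window_start window_length out) := by unfold Spec_format_bit_pattern; infer_instance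

-- ===== CLAIM (what is proved, stated in full; the proofs are below) =====
def Claim_equal_format_bit_pattern : Prop := ∀ (binary_string : String) (window_start : Int) (window_length : Option Int), Dom_format_bit_pattern binary_string window_start window_length → Spec_format_bit_pattern binary_string window_start window_length (format_bit_pattern binary_string window_start window_length)

-- ===== LEMMAS AND PROOFS =====

-- A's loop, reduced to the character list (the inserted characters of A's scan).
def pvF : List Char → Int → List Char
  | [], _ => []
  | c :: t, i => (if 0 < i ∧ PySem.Int.mod i 8 = 0 then [' '] else []) ++ c :: pvF t (i + 1)

-- B's chunk list, reduced to the character list.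
def pvChunks (l : List Char) : List (List Char) :=
  (PySem.List.pyRange 0 (l.length : Int) 8).map
    (fun i => PySem.List.slice l (some i) (some (i + 8)))

theorem pvA_toList (l : List Char) (i : Int) (acc : String) :
    ((PySem.List.enumerate l i).foldl
      (fun formatted p =>
        let formatted := if 0 < p.1 ∧ PySem.Int.mod p.1 8 = 0 then formatted ++ " " else formatted
        formatted ++ String.singleton p.2) acc).toList = acc.toList ++ pvF l i := by
  induction l generalizing i acc with
  | nil => simp [PySem.List.enumerate_nil, pvF]
  | cons c t ih =>
    simp only [PySem.List.enumerate_cons, List.foldl_cons, ih, pvF]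
    split_ifs <;> simp [String.toList_append]

theorem pvF_shift (l : List Char) : ∀ (i : Int), 1 ≤ i → pvF l i = pvF l (i + 8) := by
  induction l with
  | nil => intro i _; rfl
  | cons c t ih =>
    intro i hi
    have hmod : (0 < i ∧ PySem.Int.mod i 8 = 0) ↔ (0 < i + 8 ∧ PySem.Int.mod (i + 8) 8 = 0) := by
      rw [PySem.Int.mod_eq_zero_iff_dvd,
          PySem.Int.mod_eq_zero_iff_dvd]
      omega
    simp only [pvF]
    rw [if_congr hmod rfl rfl, ih (i + 1) (by omega)]
    ring_nf

theorem pvF_aux : ∀ (k : Nat), k ≤ 7 → ∀ t : List Char,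
    pvF t (8 - (k : Int)) = t.take k ++ pvF (t.drop k) 8 := by
  intro k
  induction k with
  | zero => intro _ t; simp
  | succ k ih =>
    intro hk t
    cases t with
    | nil => simp [pvF]
    | cons c t' =>
      have hcond : ¬ (0 < (8 - ((k : Int) + 1)) ∧ PySem.Int.mod (8 - ((k : Int) + 1)) 8 = 0) := by
        rw [PySem.Int.mod_eq_zero_iff_dvd]
        omega
      simp only [pvF]
      push_cast
      rw [if_neg (by push_cast at hcond ⊢; exact hcond)]
      have : (8 : Int) - ((k : Int) + 1) + 1 = 8 - (k : Int) := by ring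
      rw [this, ih (by omega) t']
      simp

theorem pvF_zero_split (l : List Char) : pvF l 0 = l.take 8 ++ pvF (l.drop 8) 8 := by
  cases l with
  | nil => simp [pvF]
  | cons c t =>
    simp only [pvF, if_neg (by omega : ¬ ((0:Int) < 0 ∧ PySem.Int.mod 0 8 = 0))]
    have h7 := pvF_aux 7 (by omega) t
    norm_num at h7
    have : (0 : Int) + 1 = 8 - 7 := by norm_num
    rw [this, (by norm_num : (8 : Int) - 7 = 1)] at *
    simp only [List.take_succ_cons, List.drop_succ_cons, List.nil_append]
    rw [h7]; simp

theorem pvF_eight (m : List Char) : pvF m 8 = if m = [] then [] else ' ' :: pvF m 0 := by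
  cases m with
  | nil => rfl
  | cons c t =>
    have hcond : (0 < (8 : Int) ∧ PySem.Int.mod 8 8 = 0) := by
      constructor
      · norm_num
      · rw [PySem.Int.mod_eq_zero_iff_dvd]
    simp only [pvF, if_pos hcond, if_neg (by omega : ¬ ((0:Int) < 0 ∧ PySem.Int.mod 0 8 = 0))]
    rw [show (8 : Int) + 1 = 1 + 8 by ring, ← pvF_shift t 1 le_rfl]
    simp

theorem pvRange8_cons (n : Int) (hn : 0 < n) :
    PySem.List.pyRange 0 n 8 = 0 :: List.map (· + 8) (PySem.List.pyRange 0 (n - 8) 8) := by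
  rw [PySem.List.pyRange_of_pos _ _ (by norm_num : (0:Int) < 8),
      PySem.List.pyRange_of_pos _ _ (by norm_num : (0:Int) < 8)]
  by_cases h8 : 8 < n
  · have hcount : (if (0:Int) < n then ((n - 0 + 8 - 1) / 8).toNat else 0)
        = (if (0:Int) < n - 8 then ((n - 8 - 0 + 8 - 1) / 8).toNat else 0) + 1 := by
      rw [if_pos hn, if_pos (by omega)]
      omega
    rw [hcount, List.range_succ_eq_map]
    simp [List.map_map, Function.comp]
    intro a _
    push_cast
    ring
  · have hcount : (if (0:Int) < n then ((n - 0 + 8 - 1) / 8).toNat else 0) = 1 := by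
      rw [if_pos hn]; omega
    have hcount' : (if (0:Int) < n - 8 then ((n - 8 - 0 + 8 - 1) / 8).toNat else 0) = 0 := by
      rw [if_neg (by omega)]
    rw [hcount, hcount']
    simp

theorem pvMem_range8_nonneg {j n : Int} (hj : j ∈ PySem.List.pyRange 0 n 8) : 0 ≤ j := by
  rw [PySem.List.pyRange_of_pos _ _ (by norm_num : (0:Int) < 8)] at hj
  simp at hj
  obtain ⟨k, _, hk⟩ := hj
  omega

theorem pvMain : ∀ (fuel : Nat) (l : List Char), l.length ≤ fuel →
    pvF l 0 = PySem.Chars.join [' '] (pvChunks l) := by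
  intro fuel
  induction fuel with
  | zero =>
    intro l hl
    have : l = [] := List.eq_nil_of_length_eq_zero (by omega)
    subst this
    simp [pvF, pvChunks, PySem.List.pyRange, PySem.Chars.join_nil]
  | succ fuel ih =>
    intro l hl
    cases hl0 : l with
    | nil => simp [pvF, pvChunks, PySem.List.pyRange, PySem.Chars.join_nil]
    | cons c t =>
      subst hl0
      set l := c :: t with hldef
      have hn : (0 : Int) < (l.length : Int) := by simp [hldef]
      rw [pvF_zero_split l, pvF_eight]
      unfold pvChunks
      rw [pvRange8_cons _ hn]
      rw [List.map_cons]
      have hslice0 : PySem.List.slice l (some (0:Int)) (some ((0:Int) + 8)) = l.take 8 := by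
        rw [(by norm_num : (0:Int) + 8 = ((8:Nat):Int)), (by norm_num : (0:Int) = ((0:Nat):Int)),
            PySem.List.slice_natCast]
        simp
      rw [hslice0]
      have hmap : List.map (fun i => PySem.List.slice l (some i) (some (i + 8)))
            (List.map (· + 8) (PySem.List.pyRange 0 ((l.length : Int) - 8) 8))
          = List.map (fun i => PySem.List.slice (l.drop 8) (some i) (some (i + 8)))
            (PySem.List.pyRange 0 (((l.drop 8).length : Int)) 8) := by
        by_cases h8 : 8 < (l.length : Int)
        · have hlen : (((l.drop 8).length : Int)) = (l.length : Int) - 8 := by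
            simp [List.length_drop]; omega
          rw [hlen, List.map_map]
          apply List.map_congr_left
          intro j hj
          have hj0 : 0 ≤ j := pvMem_range8_nonneg hj
          simp only [Function.comp]
          have e1 := PySem.List.slice_toNat l (a := j + 8) (b := j + 8 + 8) (by omega) (by omega)
          have e2 := PySem.List.slice_toNat (l.drop 8) (a := j) (b := j + 8) (by omega) (by omega)
          have hd : (j + 8).toNat = 8 + j.toNat := by omega
          rw [e1, e2, List.drop_drop, hd]
          congr 1
          omega
        · have h1 : PySem.List.pyRange 0 ((l.length : Int) - 8) 8 = [] := by
            rw [PySem.List.pyRange_of_pos _ _ (by norm_num : (0:Int) < 8), if_neg (by omega)]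
            simp
          have h2 : PySem.List.pyRange 0 (((l.drop 8).length : Int)) 8 = [] := by
            have : (l.drop 8).length = 0 := by simp [List.length_drop]; omega
            rw [this]
            rw [PySem.List.pyRange_of_pos _ _ (by norm_num : (0:Int) < 8), if_neg (by omega)]
            simp
          rw [h1, h2]
          simp
      rw [hmap]
      have hrec : pvF (l.drop 8) 0 = PySem.Chars.join [' '] (pvChunks (l.drop 8)) := by
        apply ih
        have : l.length = t.length + 1 := by simp [hldef]
        have hd : (l.drop 8).length = l.length - 8 := by simp [List.length_drop]
        omega
      by_cases hnil : l.drop 8 = []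
      · rw [if_pos hnil, hnil]
        have : PySem.List.pyRange 0 ((([] : List Char).length : Int)) 8 = [] := by
          simp [PySem.List.pyRange]
        rw [this]
        simp [PySem.Chars.join_singleton]
      · rw [if_neg hnil]
        have hdn : (0 : Int) < (((l.drop 8).length : Int)) := by
          have := List.length_pos_iff.mpr hnil
          omega
        -- the chunk list of the rest is nonempty: expose its head for join_cons_cons
        rw [pvRange8_cons _ hdn, List.map_cons, PySem.Chars.join_cons_cons]
        unfold pvChunks at hrec
        rw [pvRange8_cons _ hdn, List.map_cons] at hrec
        rw [← hrec]
        simp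

theorem pvB_toList (s : String) (ws : Int) (wl : Option Int) :
    (format_bit_pattern_alt s ws wl).toList = PySem.Chars.join [' '] (pvChunks s.toList) := by
  unfold format_bit_pattern_alt pvChunks
  rw [PySem.Str.toList_join, List.map_map]
  have hf : (String.toList ∘ fun i => PySem.Str.slice s (some i) (some (i + 8)))
      = (fun i => PySem.List.slice s.toList (some i) (some (i + 8))) := by
    funext i
    simp [Function.comp, PySem.Str.toList_slice, PySem.Chars.slice_eq_listSlice]
  simp [hf, PySem.Str.len_eq]

-- ===== VERDICT (by name: the statement is the Claim_ definition above) =====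
theorem format_bit_pattern_spec : Claim_equal_format_bit_pattern := by
  intro s ws wl _
  unfold Spec_format_bit_pattern
  apply String.toList_inj.mp
  rw [pvB_toList]
  have hA : (format_bit_pattern s ws wl).toList = pvF s.toList 0 := by
    unfold format_bit_pattern
    rw [pvA_toList]
    simp
  rw [hA, pvMain s.toList.length s.toList le_rfl]
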